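-- pv_equiv track=rewrite | github.com/kunal0011/myWorksSpace | python/src/Amazon/1128NumberOfEquivalentDomino.py | find_equivalent_pairs
-- ===== SOURCE A (Python) =====
-- from typing import List
--
-- def find_equivalent_pairs(dominoes: List[List[int]]) -> List[tuple]:
--     """Find all equivalent pairs for visualization (use only for small inputs)"""
--     pairs = []
--     for i in range(len(dominoes)):
--         for j in range(i + 1, len(dominoes)):
--             a, b = dominoes[i]
--             c, d = dominoes[j]
--             if (a == c and b == d) or (a == d and b == c):
--                 pairs.append((i, j))
--     return pairs
-- ===== SOURCE B (Python) =====
-- from typing import List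
--
-- def find_equivalent_pairs(dominoes: List[List[int]]) -> List[tuple]:
--     """Find all equivalent pairs for visualization (use only for small inputs)"""
--     groups = {}
--     for i, dom in enumerate(dominoes):
--         a, b = dom
--         key = (a, b) if a <= b else (b, a)
--         groups.setdefault(key, []).append(i)
--     pairs = []
--     for i, dom in enumerate(dominoes):
--         a, b = dom
--         key = (a, b) if a <= b else (b, a)
--         for j in groups.get(key, []):
--             if i < j:
--                 pairs.append((i, j))
--     return pairs
-- ===== Notes on version B (the rewrite author's own statement) =====
-- stated objective: alternative
-- what changed: B replaces the all-pairs nested scan by a hash index: one pass groups indices by the normalized (a<=b) domino key, then each index emits pairs only with the later indices of its own group, which reproduces A's lexicographic order without any sort; Pre_ excludes non-2-element dominoes, on which A raises once two indices are compared but returns an empty result when there are fewer than two dominoes, while B always unpacks and raises.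
-- outside the precondition, e.g. on find_equivalent_pairs([[1, 2, 3]]): A returns [], B raises ValueError
import Mathlib
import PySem

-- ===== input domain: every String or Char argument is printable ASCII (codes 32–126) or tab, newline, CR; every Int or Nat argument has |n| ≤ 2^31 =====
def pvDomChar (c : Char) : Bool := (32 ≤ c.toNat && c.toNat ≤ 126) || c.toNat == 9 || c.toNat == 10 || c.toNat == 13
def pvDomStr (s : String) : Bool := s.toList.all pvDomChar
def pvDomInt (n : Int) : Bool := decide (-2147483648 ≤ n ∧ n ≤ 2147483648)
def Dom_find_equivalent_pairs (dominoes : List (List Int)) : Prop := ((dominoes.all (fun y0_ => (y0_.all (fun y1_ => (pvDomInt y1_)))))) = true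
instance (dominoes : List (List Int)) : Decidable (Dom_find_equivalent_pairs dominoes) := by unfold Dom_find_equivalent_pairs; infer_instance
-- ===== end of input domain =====

-- B replaces A's all-pairs nested scan by a one-pass hash grouping of indices under the
-- normalized domino key, emitting pairs group by group; equivalence of the RETURN values.

-- ===== PORT B ===== (its helper first: Lean attaches the shared list-shape case analysis here)
-- 'a, b = dom; key = (a, b) if a <= b else (b, a)' (ValueError on a non-pair; excluded by Pre_)
def normKey (dom : List Int) : Int × Int :=
  match dom with
  | [a, b] => if a ≤ b then (a, b) else (b, a)
  | _ => (0, 0)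

-- ===== PORT A =====
def find_equivalent_pairs (dominoes : List (List Int)) : List (Int × Int) :=
  (PySem.List.pyRange 0 (PySem.List.len dominoes) 1).foldl (fun pairs i =>
    (PySem.List.pyRange (i + 1) (PySem.List.len dominoes) 1).foldl (fun pairs j =>
      match PySem.List.pyGet? dominoes i, PySem.List.pyGet? dominoes j with
      | some [a, b], some [c, d] =>
          if (a == c && b == d) || (a == d && b == c) then pairs ++ [(i, j)] else pairs
      | _, _ => pairs  -- Python raises ValueError here (unpacking a non-pair); excluded by Pre_
    ) pairs) []

-- 'groups.setdefault(key, []).append(i)' is exactly Dict.modify key [] (· ++ [i])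
def find_equivalent_pairs_alt (dominoes : List (List Int)) : List (Int × Int) :=
  let groups : PySem.Dict (Int × Int) (List Int) :=
    (PySem.List.enumerate dominoes).foldl
      (fun g p => g.modify (normKey p.2) [] (· ++ [p.1])) PySem.Dict.empty
  (PySem.List.enumerate dominoes).foldl (fun pairs p =>
    (groups.getD (normKey p.2) []).foldl (fun pairs j =>
      if p.1 < j then pairs ++ [(p.1, j)] else pairs) pairs) []

-- ===== PRECONDITION & SPEC =====
-- Pre_ excludes inputs with a domino that is not a 2-element list: on them Python A raises
-- ValueError as soon as two indices are compared, but on a list of length ≤ 1 A returns an empty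
-- result without ever unpacking, while B (which unpacks every domino to build its index) raises there.
def Pre_find_equivalent_pairs (dominoes : List (List Int)) : Prop :=
  ∀ d ∈ dominoes, d.length = 2
instance (dominoes : List (List Int)) : Decidable (Pre_find_equivalent_pairs dominoes) := by
  unfold Pre_find_equivalent_pairs; infer_instance

def pvWitness_find_equivalent_pairs : List (List Int) := [[1, 2], [2, 1], [3, 4]]

def Spec_find_equivalent_pairs (dominoes : List (List Int)) (out : List (Int × Int)) : Prop := out = find_equivalent_pairs_alt dominoes
instance (dominoes : List (List Int)) (out : List (Int × Int)) : Decidable (Spec_find_equivalent_pairs dominoes out) := by unfold Spec_find_equivalent_pairs; infer_instance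

-- ===== CLAIM (what is proved, stated in full; the proofs are below) =====
def Claim_equal_find_equivalent_pairs : Prop := ∀ (dominoes : List (List Int)), Dom_find_equivalent_pairs dominoes → Pre_find_equivalent_pairs dominoes → Spec_find_equivalent_pairs dominoes (find_equivalent_pairs dominoes)

-- ===== LEMMAS AND PROOFS =====

def eqb (dominoes : List (List Int)) (i j : Int) : Bool :=
  normKey (PySem.List.pyGetD dominoes j []) == normKey (PySem.List.pyGetD dominoes i [])

theorem normKey_cond (a b c d : Int) :
    ((a == c && b == d) || (a == d && b == c)) = (normKey [c, d] == normKey [a, b]) := by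
  simp only [normKey]
  split_ifs with h1 h2 h2 <;>
    (apply Bool.eq_iff_iff.mpr; simp [Prod.ext_iff]; omega)

theorem A_char (dominoes : List (List Int))
    (h2 : ∀ d ∈ dominoes, d.length = 2) :
    find_equivalent_pairs dominoes =
      (PySem.List.pyRange 0 (PySem.List.len dominoes) 1).flatMap
        (fun i => ((PySem.List.pyRange (i + 1) (PySem.List.len dominoes) 1).filter
          (fun j => eqb dominoes i j)).map (fun j => (i, j))) := by
  unfold find_equivalent_pairs
  rw [PySem.List.foldl_congr_mem _ _
      (fun pairs i => pairs ++ ((PySem.List.pyRange (i + 1) (PySem.List.len dominoes) 1).filter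
        (fun j => eqb dominoes i j)).map (fun j => (i, j))) _ ?_]
  · rw [PySem.List.foldl_append_eq_flatMap, List.nil_append]
  · intro acc i hi
    rw [PySem.List.mem_pyRange_one] at hi
    obtain ⟨k, rfl⟩ : ∃ k : Nat, i = (k : Int) := ⟨i.toNat, (Int.toNat_of_nonneg hi.1).symm⟩
    have hk : k < dominoes.length := by
      have := hi.2; simp [PySem.List.len] at this; exact_mod_cast this
    have hgi : PySem.List.pyGet? dominoes (k : Int) = some dominoes[k] :=
      PySem.List.pyGet?_ofNat dominoes k hk
    obtain ⟨a, b, hab⟩ : ∃ a b, dominoes[k] = [a, b] := by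
      have := h2 dominoes[k] (List.getElem_mem hk)
      match h : dominoes[k], this with
      | [a, b], _ => exact ⟨a, b, rfl⟩
    rw [PySem.List.foldl_congr_mem _ _
        (fun acc j => if eqb dominoes (k : Int) j then acc ++ [((k : Int), j)] else acc) _ ?_]
    · exact PySem.List.foldl_append_if (fun j => eqb dominoes (k : Int) j) _ _ _
    · intro acc' j hj
      rw [PySem.List.mem_pyRange_one] at hj
      obtain ⟨m, rfl⟩ : ∃ m : Nat, j = (m : Int) := ⟨j.toNat, (Int.toNat_of_nonneg (by omega)).symm⟩
      have hm : m < dominoes.length := by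
        have := hj.2; simp [PySem.List.len] at this; exact_mod_cast this
      have hgj : PySem.List.pyGet? dominoes (m : Int) = some dominoes[m] :=
        PySem.List.pyGet?_ofNat dominoes m hm
      obtain ⟨c, d, hcd⟩ : ∃ c d, dominoes[m] = [c, d] := by
        have := h2 dominoes[m] (List.getElem_mem hm)
        match h : dominoes[m], this with
        | [c, d], _ => exact ⟨c, d, rfl⟩
      rw [hgi, hgj, hab, hcd]
      simp only [eqb, PySem.List.pyGetD_natCast, List.getD_eq_getElem?_getD,
        List.getElem?_eq_getElem hk, List.getElem?_eq_getElem hm, Option.getD_some, hab, hcd,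
        normKey_cond]

theorem bucket_eq (dominoes : List (List Int)) (c : Int × Int) :
    ((PySem.List.enumerate dominoes).foldl
        (fun g p => g.modify (normKey p.2) [] (· ++ [p.1]))
        (PySem.Dict.empty : PySem.Dict (Int × Int) (List Int))).getD c [] =
      (PySem.List.pyRange 0 (PySem.List.len dominoes) 1).filter
        (fun j => normKey (PySem.List.pyGetD dominoes j []) == c) := by
  have h : (PySem.List.enumerate dominoes).foldl
      (fun g p => g.modify (normKey p.2) [] (· ++ [p.1]))
      (PySem.Dict.empty : PySem.Dict (Int × Int) (List Int))
      = ((PySem.List.enumerate dominoes).map (fun p => (normKey p.2, p.1))).foldl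
        (fun g q => g.modify q.1 [] (· ++ [q.2])) PySem.Dict.empty := by
    rw [List.foldl_map]
  rw [h, PySem.Dict.getD_foldl_modify_append]
  rw [PySem.List.enumerate_eq_map_pyRange dominoes []]
  simp [List.filter_map, List.map_map, Function.comp_def]

theorem B_char (dominoes : List (List Int)) :
    find_equivalent_pairs_alt dominoes =
      (PySem.List.pyRange 0 (PySem.List.len dominoes) 1).flatMap
        (fun i => (((PySem.List.pyRange 0 (PySem.List.len dominoes) 1).filter
            (fun j => eqb dominoes i j)).filter
            (fun j => decide (i < j))).map (fun j => (i, j))) := by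
  unfold find_equivalent_pairs_alt
  simp only []
  rw [PySem.List.foldl_congr_mem _ _
      (fun pairs p => pairs ++ (((PySem.List.pyRange 0 (PySem.List.len dominoes) 1).filter
          (fun j => eqb dominoes p.1 j)).filter
          (fun j => decide (p.1 < j))).map (fun j => (p.1, j))) _ ?_]
  · rw [PySem.List.foldl_append_eq_flatMap, List.nil_append,
      PySem.List.enumerate_eq_map_pyRange dominoes [], List.flatMap_map]
  · intro acc p hp
    rw [bucket_eq]
    have : ∀ j : Int, (normKey (PySem.List.pyGetD dominoes j []) == normKey p.2)
        = eqb dominoes p.1 j := by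
      intro j
      rw [PySem.List.enumerate_eq_map_pyRange dominoes []] at hp
      obtain ⟨i, hi, rfl⟩ := List.mem_map.mp hp
      simp [eqb]
    rw [List.filter_congr (fun j _ => this j)]
    exact PySem.List.foldl_append_ite (fun j => p.1 < j) (fun j => (p.1, j)) _ _

theorem main_eq (dominoes : List (List Int))
    (h2 : ∀ d ∈ dominoes, d.length = 2) :
    find_equivalent_pairs dominoes = find_equivalent_pairs_alt dominoes := by
  rw [A_char dominoes h2, B_char dominoes]
  apply List.flatMap_congr
  intro i hi
  rw [PySem.List.mem_pyRange_one] at hi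
  congr 1
  rw [List.filter_filter,
    PySem.List.pyRange_one_append 0 (i + 1) (PySem.List.len dominoes) (by omega) (by omega),
    List.filter_append]
  have h0 : (PySem.List.pyRange 0 (i + 1)).filter
      (fun j => decide (i < j) && eqb dominoes i j) = [] := by
    apply List.filter_eq_nil_iff.mpr
    intro j hj
    rw [PySem.List.mem_pyRange_one] at hj
    simp; omega
  rw [h0, List.nil_append]
  apply List.filter_congr
  intro j hj
  rw [PySem.List.mem_pyRange_one] at hj
  have hij : decide (i < j) = true := by simp; omega
  rw [hij, Bool.true_and]

-- ===== VERDICT (by name: the statement is the Claim_ definition above) =====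
theorem find_equivalent_pairs_spec : Claim_equal_find_equivalent_pairs := by
  intro dominoes _ hpre
  unfold Spec_find_equivalent_pairs
  exact main_eq dominoes hpre
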